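-- pv_equiv track=rewrite | github.com/abriggs914/Coding_Practice | Python/Resource/nhl_utility.py | name_from_mascot
-- ===== SOURCE A (Python) =====
-- metropolitan = {
--     "Carolina": {"acr": "CAR", "mascot": "Hurricanes", "masc_short": "Canes"},
--     "New Jersey": {"acr": "NJD", "mascot": "Devils", "masc_short": "Devils"},
--     "NY Rangers": {"acr": "NYR", "mascot": "Rangers", "masc_short": "Rangers"},
--     "Washington": {"acr": "WSH", "mascot": "Capitals", "masc_short": "Caps"},
--     "NY Islanders": {"acr": "NYI", "mascot": "Islanders", "masc_short": "Iles"},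
--     "Pittsburgh": {"acr": "PIT", "mascot": "Penguins", "masc_short": "Pens"},
--     "Philadelphia": {"acr": "PHI", "mascot": "Flyers", "masc_short": "Flyers"},
--     "Columbus": {"acr": "CBJ", "mascot": "Blue Jackets", "masc_short": "Jackets"}
-- }
--
-- atlantic = {
--     "Boston": {"acr": "BOS", "mascot": "Bruins", "masc_short": "Bruins"},
--     "Toronto": {"acr": "TOR", "mascot": "Maple Leafs", "masc_short": "Leafs"},
--     "Tampa Bay": {"acr": "TBL", "mascot": "Lightning", "masc_short": "Bolts"},
--     "Buffalo": {"acr": "BUF", "mascot": "Sabres", "masc_short": "Sabres"},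
--     "Florida": {"acr": "FLA", "mascot": "Panthers", "masc_short": "Panthers"},
--     "Detroit": {"acr": "DET", "mascot": "Red Wings", "masc_short": "Wings"},
--     "Ottawa": {"acr": "OTT", "mascot": "Senators", "masc_short": "Sens"},
--     "Montreal": {"acr": "MTL", "mascot": "Canadiens", "masc_short": "Habs"}
-- }
--
-- central = {
--     "Winnipeg": {"acr": "WPG", "mascot": "Jets", "masc_short": "Jets"},
--     "Dallas": {"acr": "DAL", "mascot": "Stars", "masc_short": "Stars"},
--     "Minnesota": {"acr": "MIN", "mascot": "Wild", "masc_short": "Wild"},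
--     "Colorado": {"acr": "COL", "mascot": "Avalanche", "masc_short": "Avs"},
--     "St. Louis": {"acr": "STL", "mascot": "Blues", "masc_short": "Blues"},
--     "Nashville": {"acr": "NSH", "mascot": "Predators", "masc_short": "Preds"},
--     "Arizona": {"acr": "ARI", "mascot": "Coyotes", "masc_short": "Coyotes"},
--     "Chicago": {"acr": "CHI", "mascot": "Blackhawks", "masc_short": "Hawks"}
-- }
--
-- pacific = {
--     "Vegas": {"acr": "VGK", "mascot": "Golden Knights", "masc_short": "Knights"},
--     "Seattle": {"acr": "SEA", "mascot": "Kraken", "masc_short": "Kraken"},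
--     "Los Angeles": {"acr": "LAK", "mascot": "Kings", "masc_short": "Kings"},
--     "Edmonton": {"acr": "EDM", "mascot": "Oilers", "masc_short": "Oilers"},
--     "Calgary": {"acr": "CGY", "mascot": "Flames", "masc_short": "Flames"},
--     "Vancouver": {"acr": "VAN", "mascot": "Canucks", "masc_short": "Canucks"},
--     "San Jose": {"acr": "SJS", "mascot": "Sharks", "masc_short": "Sharks"},
--     "Anaheim": {"acr": "ANA", "mascot": "Ducks", "masc_short": "Ducks"}
-- }
--
-- def name_from_mascot(mascot: str) -> str:
--     l_masc = mascot.lower()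
--     if not l_masc:
--         raise ValueError(f"mascot param must not be empty.")
--     for div in [atlantic, metropolitan, central, pacific]:
--         for k, dat in div.items( ):
--             if l_masc == dat.get("mascot", "").lower():
--                 return k
--     raise ValueError(f"mascot '{mascot}' could not be found")
-- ===== SOURCE B (Python) =====
-- # Flat reverse table written out once: lowercase mascot -> team name.
-- # The NHL team set is static, so a literal index is the idiomatic form;
-- # the function body then reduces to a single dict lookup.
-- _NAME_BY_MASCOT = {
--     "bruins": "Boston", "maple leafs": "Toronto", "lightning": "Tampa Bay",
--     "sabres": "Buffalo", "panthers": "Florida", "red wings": "Detroit",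
--     "senators": "Ottawa", "canadiens": "Montreal",
--     "hurricanes": "Carolina", "devils": "New Jersey", "rangers": "NY Rangers",
--     "capitals": "Washington", "islanders": "NY Islanders", "penguins": "Pittsburgh",
--     "flyers": "Philadelphia", "blue jackets": "Columbus",
--     "jets": "Winnipeg", "stars": "Dallas", "wild": "Minnesota",
--     "avalanche": "Colorado", "blues": "St. Louis", "predators": "Nashville",
--     "coyotes": "Arizona", "blackhawks": "Chicago",
--     "golden knights": "Vegas", "kraken": "Seattle", "kings": "Los Angeles",
--     "oilers": "Edmonton", "flames": "Calgary", "canucks": "Vancouver",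
--     "sharks": "San Jose", "ducks": "Anaheim",
-- }
--
-- def name_from_mascot(mascot: str) -> str:
--     l_masc = mascot.lower()
--     if not l_masc:
--         raise ValueError(f"mascot param must not be empty.")
--     name = _NAME_BY_MASCOT.get(l_masc)
--     if name is None:
--         raise ValueError(f"mascot '{mascot}' could not be found")
--     return name
-- ===== Notes on version B (the rewrite author's own statement) =====
-- stated objective: idiomatic
-- what changed: Replaces A's nested scan over the four division dicts by a flat literal reverse table (lowercase mascot -> team name) and a single dict lookup.
import Mathlib
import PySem

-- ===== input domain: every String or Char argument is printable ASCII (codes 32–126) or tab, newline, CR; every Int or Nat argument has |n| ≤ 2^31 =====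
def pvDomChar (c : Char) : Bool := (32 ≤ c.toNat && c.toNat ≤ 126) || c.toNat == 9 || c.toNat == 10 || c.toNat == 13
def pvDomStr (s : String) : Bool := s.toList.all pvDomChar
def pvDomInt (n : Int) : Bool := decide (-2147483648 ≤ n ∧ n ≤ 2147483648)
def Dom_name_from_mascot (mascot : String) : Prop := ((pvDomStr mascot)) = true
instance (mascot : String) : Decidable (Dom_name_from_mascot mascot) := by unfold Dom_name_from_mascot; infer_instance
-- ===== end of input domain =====

-- B replaces A's nested scan over the four division dicts by one flat literal
-- reverse table (lowercase mascot -> team name) and a single dict lookup (idiomatic).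
-- A raises ValueError on empty or unknown mascots; those inputs are outside Pre_
-- and both ports return "" there.

-- ===== PORT A =====
-- A's data: the four division dicts, as in the Python module
def pvMetropolitan : List (String × PySem.Dict String String) := [
  ("Carolina", PySem.Dict.ofList [("acr","CAR"),("mascot","Hurricanes"),("masc_short","Canes")]),
  ("New Jersey", PySem.Dict.ofList [("acr","NJD"),("mascot","Devils"),("masc_short","Devils")]),
  ("NY Rangers", PySem.Dict.ofList [("acr","NYR"),("mascot","Rangers"),("masc_short","Rangers")]),
  ("Washington", PySem.Dict.ofList [("acr","WSH"),("mascot","Capitals"),("masc_short","Caps")]),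
  ("NY Islanders", PySem.Dict.ofList [("acr","NYI"),("mascot","Islanders"),("masc_short","Iles")]),
  ("Pittsburgh", PySem.Dict.ofList [("acr","PIT"),("mascot","Penguins"),("masc_short","Pens")]),
  ("Philadelphia", PySem.Dict.ofList [("acr","PHI"),("mascot","Flyers"),("masc_short","Flyers")]),
  ("Columbus", PySem.Dict.ofList [("acr","CBJ"),("mascot","Blue Jackets"),("masc_short","Jackets")])]

def pvAtlantic : List (String × PySem.Dict String String) := [
  ("Boston", PySem.Dict.ofList [("acr","BOS"),("mascot","Bruins"),("masc_short","Bruins")]),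
  ("Toronto", PySem.Dict.ofList [("acr","TOR"),("mascot","Maple Leafs"),("masc_short","Leafs")]),
  ("Tampa Bay", PySem.Dict.ofList [("acr","TBL"),("mascot","Lightning"),("masc_short","Bolts")]),
  ("Buffalo", PySem.Dict.ofList [("acr","BUF"),("mascot","Sabres"),("masc_short","Sabres")]),
  ("Florida", PySem.Dict.ofList [("acr","FLA"),("mascot","Panthers"),("masc_short","Panthers")]),
  ("Detroit", PySem.Dict.ofList [("acr","DET"),("mascot","Red Wings"),("masc_short","Wings")]),
  ("Ottawa", PySem.Dict.ofList [("acr","OTT"),("mascot","Senators"),("masc_short","Sens")]),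
  ("Montreal", PySem.Dict.ofList [("acr","MTL"),("mascot","Canadiens"),("masc_short","Habs")])]

def pvCentral : List (String × PySem.Dict String String) := [
  ("Winnipeg", PySem.Dict.ofList [("acr","WPG"),("mascot","Jets"),("masc_short","Jets")]),
  ("Dallas", PySem.Dict.ofList [("acr","DAL"),("mascot","Stars"),("masc_short","Stars")]),
  ("Minnesota", PySem.Dict.ofList [("acr","MIN"),("mascot","Wild"),("masc_short","Wild")]),
  ("Colorado", PySem.Dict.ofList [("acr","COL"),("mascot","Avalanche"),("masc_short","Avs")]),
  ("St. Louis", PySem.Dict.ofList [("acr","STL"),("mascot","Blues"),("masc_short","Blues")]),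
  ("Nashville", PySem.Dict.ofList [("acr","NSH"),("mascot","Predators"),("masc_short","Preds")]),
  ("Arizona", PySem.Dict.ofList [("acr","ARI"),("mascot","Coyotes"),("masc_short","Coyotes")]),
  ("Chicago", PySem.Dict.ofList [("acr","CHI"),("mascot","Blackhawks"),("masc_short","Hawks")])]

def pvPacific : List (String × PySem.Dict String String) := [
  ("Vegas", PySem.Dict.ofList [("acr","VGK"),("mascot","Golden Knights"),("masc_short","Knights")]),
  ("Seattle", PySem.Dict.ofList [("acr","SEA"),("mascot","Kraken"),("masc_short","Kraken")]),
  ("Los Angeles", PySem.Dict.ofList [("acr","LAK"),("mascot","Kings"),("masc_short","Kings")]),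
  ("Edmonton", PySem.Dict.ofList [("acr","EDM"),("mascot","Oilers"),("masc_short","Oilers")]),
  ("Calgary", PySem.Dict.ofList [("acr","CGY"),("mascot","Flames"),("masc_short","Flames")]),
  ("Vancouver", PySem.Dict.ofList [("acr","VAN"),("mascot","Canucks"),("masc_short","Canucks")]),
  ("San Jose", PySem.Dict.ofList [("acr","SJS"),("mascot","Sharks"),("masc_short","Sharks")]),
  ("Anaheim", PySem.Dict.ofList [("acr","ANA"),("mascot","Ducks"),("masc_short","Ducks")])]

-- inner loop: for k, dat in div.items(): if l_masc == dat.get("mascot","").lower(): return k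
def pvScanDiv (l : String) : List (String × PySem.Dict String String) → Option String
  | [] => none
  | (k, dat) :: rest =>
    if l == PySem.Str.lower (PySem.Dict.getD dat "mascot" "") then some k else pvScanDiv l rest

-- outer loop: for div in [atlantic, metropolitan, central, pacific]
def pvScanDivs (l : String) : List (List (String × PySem.Dict String String)) → Option String
  | [] => none
  | div :: rest =>
    match pvScanDiv l div with
    | some k => some k
    | none => pvScanDivs l rest

-- the two 'raise ValueError' paths (empty mascot / not found) return "" here; Pre_ excludes them
def name_from_mascot (mascot : String) : String :=
  let l_masc := PySem.Str.lower mascot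
  if l_masc == "" then ""
  else
    match pvScanDivs l_masc [pvAtlantic, pvMetropolitan, pvCentral, pvPacific] with
    | some k => k
    | none => ""

-- ===== PORT B =====
-- B's data: the flat literal reverse table _NAME_BY_MASCOT from Source B
def pvNameByMascot : PySem.Dict String String := PySem.Dict.ofList [
  ("bruins","Boston"), ("maple leafs","Toronto"), ("lightning","Tampa Bay"),
  ("sabres","Buffalo"), ("panthers","Florida"), ("red wings","Detroit"),
  ("senators","Ottawa"), ("canadiens","Montreal"),
  ("hurricanes","Carolina"), ("devils","New Jersey"), ("rangers","NY Rangers"),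
  ("capitals","Washington"), ("islanders","NY Islanders"), ("penguins","Pittsburgh"),
  ("flyers","Philadelphia"), ("blue jackets","Columbus"),
  ("jets","Winnipeg"), ("stars","Dallas"), ("wild","Minnesota"),
  ("avalanche","Colorado"), ("blues","St. Louis"), ("predators","Nashville"),
  ("coyotes","Arizona"), ("blackhawks","Chicago"),
  ("golden knights","Vegas"), ("kraken","Seattle"), ("kings","Los Angeles"),
  ("oilers","Edmonton"), ("flames","Calgary"), ("canucks","Vancouver"),
  ("sharks","San Jose"), ("ducks","Anaheim")]

-- the two 'raise ValueError' paths (empty mascot / lookup miss) return "" here; Pre_ excludes them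
def name_from_mascot_alt (mascot : String) : String :=
  let l_masc := PySem.Str.lower mascot
  if l_masc == "" then ""
  else
    match PySem.Dict.get? pvNameByMascot l_masc with
    | some name => name
    | none => ""

-- ===== PRECONDITION & SPEC =====
-- Pre_ excludes exactly the inputs where Python A raises ValueError: the empty string
-- and any mascot whose lowercase is not one of the 32 NHL mascots.
def pvMascotsLower : List String :=
  ["bruins","maple leafs","lightning","sabres","panthers","red wings","senators","canadiens",
   "hurricanes","devils","rangers","capitals","islanders","penguins","flyers","blue jackets",
   "jets","stars","wild","avalanche","blues","predators","coyotes","blackhawks",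
   "golden knights","kraken","kings","oilers","flames","canucks","sharks","ducks"]

def Pre_name_from_mascot (mascot : String) : Prop :=
  PySem.Str.lower mascot ∈ pvMascotsLower
instance (mascot : String) : Decidable (Pre_name_from_mascot mascot) := by
  unfold Pre_name_from_mascot; infer_instance

def pvWitness_name_from_mascot : String := "Golden Knights"

def Spec_name_from_mascot (mascot : String) (out : String) : Prop := out = name_from_mascot_alt mascot
instance (mascot : String) (out : String) : Decidable (Spec_name_from_mascot mascot out) := by unfold Spec_name_from_mascot; infer_instance

-- ===== CLAIM (what is proved, stated in full; the proofs are below) =====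
def Claim_equal_name_from_mascot : Prop := ∀ (mascot : String), Dom_name_from_mascot mascot → Pre_name_from_mascot mascot → Spec_name_from_mascot mascot (name_from_mascot mascot)

-- ===== LEMMAS AND PROOFS =====
-- Both ports depend on the input only through l_masc = lower mascot; on each of the
-- 32 admitted lowercase mascots, A's scan and B's reverse-table lookup agree.
set_option maxRecDepth 4096 in
theorem pvCore_agree : ∀ l ∈ pvMascotsLower,
    (if l == "" then ""
     else match pvScanDivs l [pvAtlantic, pvMetropolitan, pvCentral, pvPacific] with
          | some k => k | none => "")
    = (if l == "" then ""
       else match PySem.Dict.get? pvNameByMascot l with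
            | some name => name | none => "") := by decide

-- ===== VERDICT (by name: the statement is the Claim_ definition above) =====
theorem name_from_mascot_spec : Claim_equal_name_from_mascot := by
  intro mascot _ hpre
  unfold Spec_name_from_mascot name_from_mascot name_from_mascot_alt
  exact pvCore_agree _ hpre
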